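-- pv_equiv track=rewrite | github.com/BobbyBand/Bit-flip-Attack-BFA- | DeepRecon_Simulation/simulate_deeprecon_vgg_pytorch.py | vgg_fsm_parse
-- ===== SOURCE A (Python) =====
-- from typing import List, Dict, Tuple
--
-- def vgg_fsm_parse(events: List[Tuple[int,str]], convs_per_block: List[int]) -> List[str]:
--     """
--     Grammar:
--       For each block b with k=convs_per_block[b]:
--         repeat k times: Conv2D -> [BiasAdd]? -> ReLU
--         then: MaxPool
--       Classifier:
--         (FC -> [BiasAdd]? -> ReLU) x2
--         (FC -> [BiasAdd]? -> Softmax) x1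
--     """
--     recovered = []
--     state = "BLOCKS"
--     b = 0
--     c_in_block = 0
--     need_relu = False
--     bias_seen = False
--     fc_count = 0
--     expect_relu = False
--     bias_seen_fc = False
--     for ts, f in events:
--         if state == "BLOCKS":
--             if b < len(convs_per_block):
--                 k = convs_per_block[b]
--                 if f == "Conv2D" and not need_relu and c_in_block < k:
--                     recovered.append("Conv2D")
--                     need_relu = True
--                     bias_seen = False
--                 elif f == "BiasAdd" and need_relu and not bias_seen:
--                     recovered.append("BiasAdd")
--                     bias_seen = True
--                 elif f == "ReLU" and need_relu:
--                     recovered.append("ReLU")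
--                     need_relu = False
--                     c_in_block += 1
--                 elif f == "MaxPool" and (c_in_block == k) and not need_relu:
--                     recovered.append("MaxPool")
--                     b += 1; c_in_block = 0
--             if b == len(convs_per_block) and not need_relu:
--                 state = "CLS"
--         elif state == "CLS":
--             # three FC groups
--             if f == "FC" and not expect_relu and fc_count < 3:
--                 recovered.append("FC")
--                 fc_count += 1
--                 expect_relu = True
--                 bias_seen_fc = False
--             elif f == "BiasAdd" and expect_relu and not bias_seen_fc:
--                 recovered.append("BiasAdd")
--                 bias_seen_fc = True
--             elif f in ("ReLU","Softmax") and expect_relu: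
--                 want = "ReLU" if fc_count < 3 else "Softmax"
--                 if f == want:
--                     recovered.append(f)
--                     expect_relu = False
--                 # stop after Softmax accepted
--                 if fc_count == 3 and f == "Softmax":
--                     break
--     return recovered
-- ===== SOURCE B (Python) =====
-- from typing import List, Tuple
--
-- def vgg_fsm_parse(events: List[Tuple[int, str]], convs_per_block: List[int]) -> List[str]:
--     recovered = []
--     it = iter(events)
--     # Phase 1: conv blocks; consumes the boundary event (the last MaxPool,
--     # or one event when there are no blocks) before handing over to phase 2.
--     b = 0
--     c = 0
--     need_relu = False
--     bias_seen = False
--     for _, f in it: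
--         if b < len(convs_per_block):
--             k = convs_per_block[b]
--             if f == "Conv2D" and not need_relu and c < k:
--                 recovered.append("Conv2D"); need_relu = True; bias_seen = False
--             elif f == "BiasAdd" and need_relu and not bias_seen:
--                 recovered.append("BiasAdd"); bias_seen = True
--             elif f == "ReLU" and need_relu:
--                 recovered.append("ReLU"); need_relu = False; c += 1
--             elif f == "MaxPool" and c == k and not need_relu:
--                 recovered.append("MaxPool"); b += 1; c = 0
--         if b == len(convs_per_block) and not need_relu:
--             break
--     # Phase 2: classifier, one inner loop per FC group
--     for want in ("ReLU", "ReLU", "Softmax"):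
--         started = False
--         bias = False
--         for _, f in it:
--             if f == "FC" and not started:
--                 recovered.append("FC"); started = True; bias = False
--             elif f == "BiasAdd" and started and not bias:
--                 recovered.append("BiasAdd"); bias = True
--             elif started and f == want:
--                 recovered.append(f)
--                 break
--     return recovered
-- ===== Notes on version B (the rewrite author's own statement) =====
-- stated objective: alternative
-- what changed: A's single monolithic FSM loop with a state variable is re-decomposed into two sequential phases over one shared event stream: a conv-block phase that consumes through the boundary event, then a classifier phase of three want-driven FC-group loops with no fc_count/expect_relu state.
import Mathlib
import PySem

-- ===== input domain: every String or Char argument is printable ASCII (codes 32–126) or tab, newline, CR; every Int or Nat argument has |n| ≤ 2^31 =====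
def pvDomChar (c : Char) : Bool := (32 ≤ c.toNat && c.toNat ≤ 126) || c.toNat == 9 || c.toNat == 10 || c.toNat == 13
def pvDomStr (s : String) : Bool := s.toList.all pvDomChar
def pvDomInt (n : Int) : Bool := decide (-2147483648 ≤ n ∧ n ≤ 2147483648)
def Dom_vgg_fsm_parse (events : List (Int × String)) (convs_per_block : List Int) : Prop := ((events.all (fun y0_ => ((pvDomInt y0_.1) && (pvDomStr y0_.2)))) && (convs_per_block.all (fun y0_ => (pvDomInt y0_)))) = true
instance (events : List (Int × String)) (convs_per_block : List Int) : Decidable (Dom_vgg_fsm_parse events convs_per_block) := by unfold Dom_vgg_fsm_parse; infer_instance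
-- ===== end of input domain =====

-- B re-decomposes A's single monolithic FSM loop into two sequential phases over one shared
-- event stream — a conv-block phase and a classifier phase of three want-driven FC-group loops
-- (objective: simpler decomposition; same cost, return value identical).

-- ===== PORT A =====
-- body of A's BLOCKS state for one event: returns (recovered, b, c_in_block, need_relu, bias_seen)
def vggA_blockStep (f : String) (cpb : List Int) (recovered : List String)
    (b c : Int) (need_relu bias_seen : Bool) : List String × Int × Int × Bool × Bool :=
  if b < (cpb.length : Int) then
    let k := (PySem.List.pyGet? cpb b).getD 0   -- here always 0 ≤ b < len, so the index is in range
    if f = "Conv2D" ∧ need_relu = false ∧ c < k then (recovered ++ ["Conv2D"], b, c, true, false)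
    else if f = "BiasAdd" ∧ need_relu = true ∧ bias_seen = false then (recovered ++ ["BiasAdd"], b, c, need_relu, true)
    else if f = "ReLU" ∧ need_relu = true then (recovered ++ ["ReLU"], b, c + 1, false, bias_seen)
    else if f = "MaxPool" ∧ c = k ∧ need_relu = false then (recovered ++ ["MaxPool"], b + 1, 0, need_relu, bias_seen)
    else (recovered, b, c, need_relu, bias_seen)
  else (recovered, b, c, need_relu, bias_seen)

-- A's event loop, one parameter per Python local (early `return` via not recursing)
def vggA_loop (events : List (Int × String)) (cpb : List Int) (recovered : List String)
    (state : String) (b c : Int) (need_relu bias_seen : Bool)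
    (fc : Int) (expect_relu bias_fc : Bool) : List String :=
  match events with
  | [] => recovered
  | (_, f) :: rest =>
    if state = "BLOCKS" then
      let s := vggA_blockStep f cpb recovered b c need_relu bias_seen
      let state' := if s.2.1 = (cpb.length : Int) ∧ s.2.2.2.1 = false then "CLS" else state
      vggA_loop rest cpb s.1 state' s.2.1 s.2.2.1 s.2.2.2.1 s.2.2.2.2 fc expect_relu bias_fc
    else if state = "CLS" then
      if f = "FC" ∧ expect_relu = false ∧ fc < 3 then
        vggA_loop rest cpb (recovered ++ ["FC"]) state b c need_relu bias_seen (fc + 1) true false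
      else if f = "BiasAdd" ∧ expect_relu = true ∧ bias_fc = false then
        vggA_loop rest cpb (recovered ++ ["BiasAdd"]) state b c need_relu bias_seen fc expect_relu true
      else if (f = "ReLU" ∨ f = "Softmax") ∧ expect_relu = true then
        let want := if fc < 3 then "ReLU" else "Softmax"
        let rec' := if f = want then recovered ++ [f] else recovered
        let er' := if f = want then false else expect_relu
        if fc = 3 ∧ f = "Softmax" then rec'   -- break: after Softmax accepted
        else vggA_loop rest cpb rec' state b c need_relu bias_seen fc er' bias_fc
      else vggA_loop rest cpb recovered state b c need_relu bias_seen fc expect_relu bias_fc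
    else vggA_loop rest cpb recovered state b c need_relu bias_seen fc expect_relu bias_fc

def vgg_fsm_parse (events : List (Int × String)) (convs_per_block : List Int) : List String :=
  vggA_loop events convs_per_block [] "BLOCKS" 0 0 false false 0 false false

-- ===== PORT B =====
-- phase-1 loop body for one event (identical grammar branches as stated in Source B)
def vggB_blockStep (f : String) (cpb : List Int) (out : List String)
    (b c : Int) (need_relu bias_seen : Bool) : List String × Int × Int × Bool × Bool :=
  if b < (cpb.length : Int) then
    let k := (PySem.List.pyGet? cpb b).getD 0   -- here always 0 ≤ b < len, so the index is in range
    if f = "Conv2D" ∧ need_relu = false ∧ c < k then (out ++ ["Conv2D"], b, c, true, false)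
    else if f = "BiasAdd" ∧ need_relu = true ∧ bias_seen = false then (out ++ ["BiasAdd"], b, c, need_relu, true)
    else if f = "ReLU" ∧ need_relu = true then (out ++ ["ReLU"], b, c + 1, false, bias_seen)
    else if f = "MaxPool" ∧ c = k ∧ need_relu = false then (out ++ ["MaxPool"], b + 1, 0, need_relu, bias_seen)
    else (out, b, c, need_relu, bias_seen)
  else (out, b, c, need_relu, bias_seen)

-- phase 1: consume events through the block grammar; `break` returns the unconsumed rest
def vggB_phase1 (events : List (Int × String)) (cpb : List Int) (out : List String)
    (b c : Int) (need_relu bias_seen : Bool) : List String × List (Int × String) :=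
  match events with
  | [] => (out, [])
  | (_, f) :: rest =>
    let s := vggB_blockStep f cpb out b c need_relu bias_seen
    if s.2.1 = (cpb.length : Int) ∧ s.2.2.2.1 = false then (s.1, rest)
    else vggB_phase1 rest cpb s.1 s.2.1 s.2.2.1 s.2.2.2.1 s.2.2.2.2

-- one FC group: read events until the wanted closer is accepted; return rest of the stream
def vggB_group (events : List (Int × String)) (want : String)
    (out : List String) (started bias : Bool) : List String × List (Int × String) :=
  match events with
  | [] => (out, [])
  | (_, f) :: rest =>
    if f = "FC" ∧ started = false then vggB_group rest want (out ++ ["FC"]) true false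
    else if f = "BiasAdd" ∧ started = true ∧ bias = false then vggB_group rest want (out ++ ["BiasAdd"]) started true
    else if started = true ∧ f = want then (out ++ [f], rest)
    else vggB_group rest want out started bias

-- phase 2: the three FC groups in sequence over the remaining stream
def vggB_phase2 (wants : List String) (events : List (Int × String)) (out : List String) : List String :=
  match wants with
  | [] => out
  | w :: ws =>
    let g := vggB_group events w out false false
    vggB_phase2 ws g.2 g.1

def vgg_fsm_parse_alt (events : List (Int × String)) (convs_per_block : List Int) : List String :=
  let p := vggB_phase1 events convs_per_block [] 0 0 false false
  vggB_phase2 ["ReLU", "ReLU", "Softmax"] p.2 p.1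

-- ===== PRECONDITION & SPEC =====
def Spec_vgg_fsm_parse (events : List (Int × String)) (convs_per_block : List Int) (out : List String) : Prop := out = vgg_fsm_parse_alt events convs_per_block
instance (events : List (Int × String)) (convs_per_block : List Int) (out : List String) : Decidable (Spec_vgg_fsm_parse events convs_per_block out) := by unfold Spec_vgg_fsm_parse; infer_instance

-- ===== CLAIM (what is proved, stated in full; the proofs are below) =====
def Claim_equal_vgg_fsm_parse : Prop := ∀ (events : List (Int × String)) (convs_per_block : List Int), Dom_vgg_fsm_parse events convs_per_block → Spec_vgg_fsm_parse events convs_per_block (vgg_fsm_parse events convs_per_block)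

-- ===== LEMMAS AND PROOFS =====

theorem phase2_nil (ws : List String) (out : List String) : vggB_phase2 ws [] out = out := by
  induction ws with
  | nil => rfl
  | cons w ws ih => simp [vggB_phase2, vggB_group, ih]

-- A's CLS state vs B's per-group loops (not-started / started, simultaneously)
theorem cls_sim (cpb : List Int) (b c : Int) (nr bs : Bool) :
    ∀ events : List (Int × String),
      (∀ (out : List String) (bf : Bool) (fc : Int), fc = 0 ∨ fc = 1 ∨ fc = 2 →
        vggA_loop events cpb out "CLS" b c nr bs fc false bf
          = vggB_phase2 (List.drop fc.toNat ["ReLU", "ReLU", "Softmax"]) events out)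
      ∧ (∀ (out : List String) (bf : Bool) (fc : Int), fc = 1 ∨ fc = 2 ∨ fc = 3 →
        vggA_loop events cpb out "CLS" b c nr bs fc true bf
          = if fc = 3 then (vggB_group events "Softmax" out true bf).1
            else vggB_phase2 (List.drop fc.toNat ["ReLU", "ReLU", "Softmax"])
                   (vggB_group events "ReLU" out true bf).2
                   (vggB_group events "ReLU" out true bf).1) := by
  intro events
  induction events with
  | nil =>
    constructor <;> intro out bf fc hfc <;> rcases hfc with rfl|rfl|rfl <;>
      simp [vggA_loop, vggB_group, phase2_nil]
  | cons e rest ih =>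
    obtain ⟨ts, f⟩ := e
    constructor
    · intro out bf fc hfc
      by_cases hFC : f = "FC"
      · subst hFC
        rcases hfc with rfl|rfl|rfl
        · simpa [vggA_loop, vggB_phase2, vggB_group] using ih.2 (out ++ ["FC"]) false 1 (by norm_num)
        · simpa [vggA_loop, vggB_phase2, vggB_group] using ih.2 (out ++ ["FC"]) false 2 (by norm_num)
        · simpa [vggA_loop, vggB_phase2, vggB_group] using ih.2 (out ++ ["FC"]) false 3 (by norm_num)
      · rcases hfc with rfl|rfl|rfl
        · simpa [vggA_loop, vggB_phase2, vggB_group, hFC] using ih.1 out bf 0 (by norm_num)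
        · simpa [vggA_loop, vggB_phase2, vggB_group, hFC] using ih.1 out bf 1 (by norm_num)
        · simpa [vggA_loop, vggB_phase2, vggB_group, hFC] using ih.1 out bf 2 (by norm_num)
    · intro out bf fc hfc
      by_cases hBA : f = "BiasAdd"
      · subst hBA
        cases bf
        · rcases hfc with rfl|rfl|rfl
          · simpa [vggA_loop, vggB_phase2, vggB_group] using ih.2 (out ++ ["BiasAdd"]) true 1 (by norm_num)
          · simpa [vggA_loop, vggB_phase2, vggB_group] using ih.2 (out ++ ["BiasAdd"]) true 2 (by norm_num)
          · simpa [vggA_loop, vggB_phase2, vggB_group] using ih.2 (out ++ ["BiasAdd"]) true 3 (by norm_num)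
        · rcases hfc with rfl|rfl|rfl
          · simpa [vggA_loop, vggB_phase2, vggB_group] using ih.2 out true 1 (by norm_num)
          · simpa [vggA_loop, vggB_phase2, vggB_group] using ih.2 out true 2 (by norm_num)
          · simpa [vggA_loop, vggB_phase2, vggB_group] using ih.2 out true 3 (by norm_num)
      · by_cases hR : f = "ReLU"
        · subst hR
          rcases hfc with rfl|rfl|rfl
          · simpa [vggA_loop, vggB_phase2, vggB_group] using ih.1 (out ++ ["ReLU"]) bf 1 (by norm_num)
          · simpa [vggA_loop, vggB_phase2, vggB_group] using ih.1 (out ++ ["ReLU"]) bf 2 (by norm_num)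
          · simpa [vggA_loop, vggB_phase2, vggB_group] using ih.2 out bf 3 (by norm_num)
        · by_cases hS : f = "Softmax"
          · subst hS
            rcases hfc with rfl|rfl|rfl
            · simpa [vggA_loop, vggB_phase2, vggB_group] using ih.2 out bf 1 (by norm_num)
            · simpa [vggA_loop, vggB_phase2, vggB_group] using ih.2 out bf 2 (by norm_num)
            · simp [vggA_loop, vggB_group]
          · rcases hfc with rfl|rfl|rfl
            · simpa [vggA_loop, vggB_phase2, vggB_group, hBA, hR, hS] using ih.2 out bf 1 (by norm_num)
            · simpa [vggA_loop, vggB_phase2, vggB_group, hBA, hR, hS] using ih.2 out bf 2 (by norm_num)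
            · simpa [vggA_loop, vggB_phase2, vggB_group, hBA, hR, hS] using ih.2 out bf 3 (by norm_num)

theorem blocks_sim (cpb : List Int) :
    ∀ (events : List (Int × String)) (out : List String) (b c : Int) (nr bs : Bool),
      vggA_loop events cpb out "BLOCKS" b c nr bs 0 false false
        = vggB_phase2 ["ReLU", "ReLU", "Softmax"]
            (vggB_phase1 events cpb out b c nr bs).2
            (vggB_phase1 events cpb out b c nr bs).1 := by
  intro events
  induction events with
  | nil => intro out b c nr bs; simp [vggA_loop, vggB_phase1, phase2_nil]
  | cons e rest ih =>
    intro out b c nr bs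
    obtain ⟨ts, f⟩ := e
    simp only [vggA_loop, vggB_phase1, String.reduceEq, reduceIte, if_true]
    rw [show vggA_blockStep = vggB_blockStep from rfl]
    generalize vggB_blockStep f cpb out b c nr bs = s
    by_cases hdone : s.2.1 = (cpb.length : Int) ∧ s.2.2.2.1 = false
    · simp only [if_pos hdone]
      have h := (cls_sim cpb s.2.1 s.2.2.1 s.2.2.2.1 s.2.2.2.2 rest).1 s.1 false 0 (Or.inl rfl)
      simpa using h
    · simp only [if_neg hdone]
      exact ih s.1 s.2.1 s.2.2.1 s.2.2.2.1 s.2.2.2.2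

-- ===== VERDICT (by name: the statement is the Claim_ definition above) =====
theorem vgg_fsm_parse_spec : Claim_equal_vgg_fsm_parse := by
  intro events cpb _
  unfold Spec_vgg_fsm_parse vgg_fsm_parse vgg_fsm_parse_alt
  exact blocks_sim cpb events [] 0 0 false false
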